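-- pv_equiv track=rewrite | github.com/sin6708k/algorithms | string/ox_quiz.py | solve
-- ===== SOURCE A (Python) =====
-- def solve(T: int, test_cases: list[str]):
--     def accumulate_score(test_case: str):
--         count = 0
--         score = 0
--
--         for char in test_case:
--             if char == 'O':
--                 count += 1
--                 score += count
--             else:
--                 count = 0
--         return score
--
--     # BEGIN
--     return list(map(accumulate_score, test_cases))
-- ===== SOURCE B (Python) =====
-- def solve(T: int, test_cases: list[str]):
--     def run_score(s: str):
--         total = 0
--         i = 0
--         n = len(s)
--         while i < n:
--             if s[i] == 'O':
--                 j = i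
--                 while j < n and s[j] == 'O':
--                     j += 1
--                 k = j - i
--                 total += k * (k + 1) // 2
--                 i = j
--             else:
--                 i += 1
--         return total
--
--     return [run_score(s) for s in test_cases]
-- ===== Notes on version B (the rewrite author's own statement) =====
-- stated objective: alternative
-- what changed: replaces the per-character running accumulator (count/score pair) with a scan over maximal runs of 'O', adding the closed-form triangular number k*(k+1)//2 once per run
import Mathlib
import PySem

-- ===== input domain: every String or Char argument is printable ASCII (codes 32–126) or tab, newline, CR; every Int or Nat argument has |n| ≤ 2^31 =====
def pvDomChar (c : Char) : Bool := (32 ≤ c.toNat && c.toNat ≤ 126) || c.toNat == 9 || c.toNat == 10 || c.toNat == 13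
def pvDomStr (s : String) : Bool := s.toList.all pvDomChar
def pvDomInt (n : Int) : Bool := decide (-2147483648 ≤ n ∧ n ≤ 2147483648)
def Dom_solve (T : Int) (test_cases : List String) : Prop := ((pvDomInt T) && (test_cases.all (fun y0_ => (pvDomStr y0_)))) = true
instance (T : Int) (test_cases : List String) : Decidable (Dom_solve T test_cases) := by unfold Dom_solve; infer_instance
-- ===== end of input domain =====

-- B replaces A's per-character (count, score) accumulator with a scan over maximal runs of 'O'
-- using the closed-form triangular number per run; same O(n) cost, different decomposition.

-- ===== PORT A =====
-- the body of A's per-character for loop: state = (count, score)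
def accStep (p : Int × Int) (c : Char) : Int × Int :=
  if c = 'O' then (p.1 + 1, p.2 + p.1 + 1) else (0, p.2)

-- A's accumulate_score
def accumulateScore (s : String) : Int :=
  (s.toList.foldl accStep (0, 0)).2

def solve (T : Int) (test_cases : List String) : List Int :=
  test_cases.map accumulateScore

-- ===== PORT B =====
-- B's k*(k+1)//2
def pvTri (k : Int) : Int := PySem.Int.floordiv (k * (k + 1)) 2

-- B's outer while loop as recursion on the remaining suffix; the inner while
-- (advance j over consecutive 'O') is the takeWhile/dropWhile of the O-prefix
def runScore : List Char → Int
  | [] => 0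
  | c :: rest =>
    if c = 'O' then
      pvTri ((c :: rest).takeWhile (fun x => x == 'O')).length
        + runScore ((c :: rest).dropWhile (fun x => x == 'O'))
    else runScore rest
termination_by cs => cs.length
decreasing_by
  · simp_all
    exact List.length_dropWhile_le _ _
  · simp

def solve_alt (T : Int) (test_cases : List String) : List Int :=
  test_cases.map (fun s => runScore s.toList)

-- ===== PRECONDITION & SPEC =====
def Spec_solve (T : Int) (test_cases : List String) (out : List Int) : Prop := out = solve_alt T test_cases
instance (T : Int) (test_cases : List String) (out : List Int) : Decidable (Spec_solve T test_cases out) := by unfold Spec_solve; infer_instance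

-- ===== CLAIM (what is proved, stated in full; the proofs are below) =====
def Claim_equal_solve : Prop := ∀ (T : Int) (test_cases : List String), Dom_solve T test_cases → Spec_solve T test_cases (solve T test_cases)

-- ===== LEMMAS AND PROOFS =====

-- triangular numbers, recursively
def triN : Nat → Int
  | 0 => 0
  | k + 1 => triN k + (k + 1)

lemma two_mul_triN (k : Nat) : 2 * triN k = (k : Int) * (k + 1) := by
  induction k with
  | zero => simp [triN]
  | succ k ih => simp only [triN]; push_cast; ring_nf; ring_nf at ih; omega

lemma pvTri_eq_triN (k : Nat) : pvTri (k : Int) = triN k := by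
  have h := two_mul_triN k
  have : pvTri (k : Int) = ((k : Int) * (k + 1)) / 2 := by
    simp [pvTri]
  omega

-- A's loop across a block of k consecutive 'O's, starting with count 0
lemma foldl_replicate_O (k : Nat) (s : Int) :
    (List.replicate k 'O').foldl accStep (0, s) = ((k : Int), s + triN k) := by
  induction k with
  | zero => simp [triN]
  | succ k ih =>
    rw [List.replicate_succ', List.foldl_append, ih]
    simp [accStep, triN]
    ring

-- the O-prefix is a replicate
lemma takeWhile_O_replicate (cs : List Char) :
    cs.takeWhile (fun x => x == 'O') =
      List.replicate (cs.takeWhile (fun x => x == 'O')).length 'O' := by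
  apply List.eq_replicate_of_mem
  intro b hb
  have := List.mem_takeWhile_imp hb
  simpa using this

-- main loop invariant: A's fold from (0, s) adds runScore of the remaining chars
theorem foldl_eq_runScore (cs : List Char) (s : Int) :
    (cs.foldl accStep (0, s)).2 = s + runScore cs := by
  match cs with
  | [] => simp [runScore]
  | c :: rest =>
    by_cases hc : c = 'O'
    · subst hc
      have hsplit := List.takeWhile_append_dropWhile (p := fun x => x == 'O') (l := 'O' :: rest)
      set t := ('O' :: rest).takeWhile (fun x => x == 'O') with ht
      set d := ('O' :: rest).dropWhile (fun x => x == 'O') with hd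
      have hrep : t = List.replicate t.length 'O' := takeWhile_O_replicate _
      have hfold : ('O' :: rest).foldl accStep (0, s)
          = d.foldl accStep ((t.length : Int), s + triN t.length) := by
        conv_lhs => rw [← hsplit]
        rw [List.foldl_append, hrep, List.length_replicate, foldl_replicate_O]
      have hdlen : d.length ≤ rest.length := by
        have hdd : d = rest.dropWhile (fun x => x == 'O') := by
          simp [hd]
        rw [hdd]
        exact List.length_dropWhile_le _ _
      have hrun : runScore ('O' :: rest) = pvTri t.length + runScore d := by
        rw [runScore]; simp [← ht, ← hd]
      rw [hfold, hrun, pvTri_eq_triN]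
      match hdm : d with
      | [] => simp [runScore]
      | e :: d' =>
        have he' : e ≠ 'O' := by
          have := List.head_dropWhile_not (p := fun x => x == 'O') (l := 'O' :: rest)
            (by rw [← hd]; simp)
          simpa [← hd] using this
        have hstep : accStep ((t.length : Int), s + triN t.length) e = (0, s + triN t.length) := by
          simp [accStep, he']
        rw [List.foldl_cons, hstep, foldl_eq_runScore d' (s + triN t.length)]
        have hskip : runScore (e :: d') = runScore d' := by rw [runScore]; simp [he']
        rw [hskip]; ring
    · have hskip : runScore (c :: rest) = runScore rest := by rw [runScore]; simp [hc]
      rw [List.foldl_cons]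
      simp only [accStep, if_neg hc]
      rw [foldl_eq_runScore rest s, hskip]
termination_by cs.length
decreasing_by
  · simp at hdlen ⊢; omega
  · simp

lemma accumulateScore_eq (s : String) : accumulateScore s = runScore s.toList := by
  have := foldl_eq_runScore s.toList 0
  simpa [accumulateScore] using this

-- ===== VERDICT (by name: the statement is the Claim_ definition above) =====
theorem solve_spec : Claim_equal_solve := by
  intro T tcs _
  unfold Spec_solve solve solve_alt
  exact List.map_congr_left (fun s _ => accumulateScore_eq s)
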